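-- pv_equiv track=rewrite | github.com/mrjrask/desk_display_display_hat_mini | screens/draw_bulls_schedule.py | _strip_location_prefix
-- ===== SOURCE A (Python) =====
-- from typing import Dict, List, Optional, Sequence, Tuple
--
-- def _strip_location_prefix(name: str, locations: Sequence[str]) -> str:
--     if not name:
--         return ""
--     candidate = name.strip()
--     if not candidate:
--         return ""
--     locs = [loc.strip() for loc in locations if isinstance(loc, str) and loc.strip()]
--     for loc in sorted(set(locs), key=len, reverse=True):
--         loc_lower = loc.lower()
--         cand_lower = candidate.lower()
--         if cand_lower.startswith(loc_lower):
--             idx = len(loc)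
--             if idx < len(candidate) and candidate[idx] not in " -–—,:":
--                 continue
--             remainder = candidate[len(loc):].lstrip(" -–—,:")
--             if remainder:
--                 return remainder
--     return candidate
-- ===== SOURCE B (Python) =====
-- def _strip_location_prefix(name, locations):
--     if not name:
--         return ""
--     candidate = name.strip()
--     if not candidate:
--         return ""
--     seps = " -\u2013\u2014,:"
--     cand_lower = candidate.lower()
--     best = None  # (prefix_length, remainder) of the longest valid match so far
--     for raw in locations:
--         loc = raw.strip()
--         if not loc or not cand_lower.startswith(loc.lower()):
--             continue
--         n = len(loc)
--         if n < len(candidate) and candidate[n] not in seps: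
--             continue
--         remainder = candidate[n:].lstrip(seps)
--         if remainder and (best is None or n > best[0]):
--             best = (n, remainder)
--     return best[1] if best is not None else candidate
-- ===== Notes on version B (the rewrite author's own statement) =====
-- stated objective: simpler
-- what changed: B drops the sort and the set-dedup entirely: one pass over the raw locations keeps the valid match (case-insensitive prefix with separator boundary and non-empty remainder) of greatest length, and candidate.lower() is computed once before the loop instead of once per location.
import Mathlib
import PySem

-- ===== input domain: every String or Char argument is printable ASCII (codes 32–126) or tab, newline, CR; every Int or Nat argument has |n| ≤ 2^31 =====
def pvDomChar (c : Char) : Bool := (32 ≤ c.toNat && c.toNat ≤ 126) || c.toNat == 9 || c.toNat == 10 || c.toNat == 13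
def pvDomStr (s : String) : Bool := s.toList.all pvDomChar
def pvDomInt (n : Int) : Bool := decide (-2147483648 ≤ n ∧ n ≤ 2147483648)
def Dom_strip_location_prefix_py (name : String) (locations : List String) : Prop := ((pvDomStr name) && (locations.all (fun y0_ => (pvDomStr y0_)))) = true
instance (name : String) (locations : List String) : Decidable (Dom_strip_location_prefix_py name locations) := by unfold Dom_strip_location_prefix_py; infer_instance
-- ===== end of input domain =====

-- B drops A's length-sort and set-dedup: a single pass over the locations keeps the valid
-- match of greatest length, lowering the candidate once instead of per location
-- (objective: simpler; measured faster in a timing run; same results, proved below).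


-- the separator characters " -–—,:" of the Python source, shared literal
def pvSeps : List Char := [' ', '-', '–', '—', ',', ':']

-- ===== PORT A =====
-- A's for-loop: return at the first location that matches with a valid boundary and a
-- non-empty remainder (`.lstrip(" -–—,:")` is ported by hand as dropWhile-in-seps; exact).
def pvLoopA (candidate : List Char) : List (List Char) → List Char
  | [] => candidate
  | loc :: rest =>
      let locLower := PySem.Chars.lower loc
      let candLower := PySem.Chars.lower candidate
      if PySem.Chars.startswith candLower locLower then
        if decide (loc.length < candidate.length) && !(pvSeps.contains (candidate.getD loc.length ' ')) then
          pvLoopA candidate rest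
        else
          let remainder := (candidate.drop loc.length).dropWhile (fun c => pvSeps.contains c)
          if !remainder.isEmpty then remainder else pvLoopA candidate rest
      else pvLoopA candidate rest

def strip_location_prefix_py (name : String) (locations : List String) : String :=
  if name.toList.isEmpty then "" else
  let candidate := PySem.Chars.strip name.toList
  if candidate.isEmpty then "" else
  let locs := (locations.map (fun l => PySem.Chars.strip l.toList)).filter (fun l => !l.isEmpty)
  String.ofList (pvLoopA candidate
    (PySem.List.sorted (PySem.Set.ofList locs) (fun l => l.length) true))

-- ===== PORT B =====
-- B's single pass: fold keeping the valid match of greatest prefix length.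
def pvStepB (candidate candLower : List Char) (best : Option (Nat × List Char)) (raw : List Char) :
    Option (Nat × List Char) :=
  let loc := PySem.Chars.strip raw
  if loc.isEmpty || !(PySem.Chars.startswith candLower (PySem.Chars.lower loc)) then best
  else if decide (loc.length < candidate.length) && !(pvSeps.contains (candidate.getD loc.length ' ')) then best
  else
    let remainder := (candidate.drop loc.length).dropWhile (fun c => pvSeps.contains c)
    if remainder.isEmpty then best
    else match best with
      | none => some (loc.length, remainder)
      | some (m, r) => if loc.length > m then some (loc.length, remainder) else some (m, r)

def strip_location_prefix_py_alt (name : String) (locations : List String) : String :=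
  if name.toList.isEmpty then "" else
  let candidate := PySem.Chars.strip name.toList
  if candidate.isEmpty then "" else
  let candLower := PySem.Chars.lower candidate
  match (locations.map String.toList).foldl (pvStepB candidate candLower) none with
  | some (_, r) => String.ofList r
  | none => String.ofList candidate

-- ===== PRECONDITION & SPEC =====
def Spec_strip_location_prefix_py (name : String) (locations : List String) (out : String) : Prop := out = strip_location_prefix_py_alt name locations
instance (name : String) (locations : List String) (out : String) : Decidable (Spec_strip_location_prefix_py name locations out) := by unfold Spec_strip_location_prefix_py; infer_instance

-- ===== CLAIM (what is proved, stated in full; the proofs are below) =====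
def Claim_equal_strip_location_prefix_py : Prop := ∀ (name : String) (locations : List String), Dom_strip_location_prefix_py name locations → Spec_strip_location_prefix_py name locations (strip_location_prefix_py name locations)

-- ===== LEMMAS AND PROOFS =====

-- the remainder returned for a match of length n
def pvRem (candidate : List Char) (n : Nat) : List Char :=
  (candidate.drop n).dropWhile (fun c => pvSeps.contains c)

-- a location (already stripped and non-empty, as used by A) is a valid match for the candidate
def pvValidB (candidate loc : List Char) : Bool :=
  PySem.Chars.startswith (PySem.Chars.lower candidate) (PySem.Chars.lower loc) &&
  !(decide (loc.length < candidate.length) && !(pvSeps.contains (candidate.getD loc.length ' '))) &&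
  !(pvRem candidate loc.length).isEmpty

-- the maximal length of a valid location of ys
def pvVL (candidate : List Char) (ys : List (List Char)) : Option Nat :=
  ((ys.filter (pvValidB candidate)).map List.length).max?

-- max? only depends on membership
theorem pvMax?_ext (xs ys : List Nat) (h : ∀ n, n ∈ xs ↔ n ∈ ys) : xs.max? = ys.max? := by
  cases hx : xs.max? with
  | some a =>
      rcases List.max?_eq_some_iff.mp hx with ⟨ha, hb⟩
      exact (List.max?_eq_some_iff.mpr ⟨(h a).mp ha, fun b hbmem => hb b ((h b).mpr hbmem)⟩).symm
  | none =>
      rw [List.max?_eq_none_iff] at hx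
      subst hx
      cases hy : ys.max? with
      | none => rfl
      | some a =>
          have := List.max?_eq_some_iff.mp hy
          exact absurd ((h a).mpr this.1) List.not_mem_nil

-- A's loop returns the remainder at the maximal valid length (list sorted desc by length)
theorem pvLoopA_eq (candidate : List Char) (ys : List (List Char))
    (hs : ys.Pairwise (fun a b => b.length ≤ a.length)) :
    pvLoopA candidate ys =
      match pvVL candidate ys with
      | some n => pvRem candidate n
      | none => candidate := by
  induction ys with
  | nil => simp [pvLoopA, pvVL]
  | cons loc rest ih =>
      rcases List.pairwise_cons.mp hs with ⟨h1, h2⟩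
      unfold pvLoopA
      cases hsw : PySem.Chars.startswith (PySem.Chars.lower candidate) (PySem.Chars.lower loc) with
      | false =>
          have hv : pvValidB candidate loc = false := by
            simp only [pvValidB, hsw, Bool.false_and]
          have hvl : pvVL candidate (loc :: rest) = pvVL candidate rest := by
            simp [pvVL, hv]
          simp only [hsw, Bool.false_eq_true, if_false, hvl]
          exact ih h2
      | true =>
          cases hbd : (decide (loc.length < candidate.length) &&
              !(pvSeps.contains (candidate.getD loc.length ' '))) with
          | true =>
              have hv : pvValidB candidate loc = false := by
                simp only [pvValidB, hbd, Bool.not_true, Bool.and_false, Bool.false_and]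
              have hvl : pvVL candidate (loc :: rest) = pvVL candidate rest := by
                simp [pvVL, hv]
              simp only [hsw, if_true, hvl]
              exact ih h2
          | false =>
              cases hrem : ((candidate.drop loc.length).dropWhile
                  (fun c => pvSeps.contains c)).isEmpty with
              | true =>
                  have hv : pvValidB candidate loc = false := by
                    simp only [pvValidB, pvRem, hrem, Bool.not_true, Bool.and_false]
                  have hvl : pvVL candidate (loc :: rest) = pvVL candidate rest := by
                    simp [pvVL, hv]
                  simp only [hsw, hrem, Bool.false_eq_true, Bool.not_true,
                    if_true, if_false, hvl]
                  exact ih h2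
              | false =>
                  have hv : pvValidB candidate loc = true := by
                    simp only [pvValidB, pvRem, hsw, hbd, hrem, Bool.not_false,
                      Bool.and_true]
                  have hmax : pvVL candidate (loc :: rest) = some loc.length := by
                    apply List.max?_eq_some_iff.mpr
                    constructor
                    · simp [hv]
                    · intro b hbmem
                      simp only [List.filter_cons, hv, if_pos, List.map_cons,
                        List.mem_cons, List.mem_map, List.mem_filter] at hbmem
                      rcases hbmem with rfl | ⟨l, hl, rfl⟩
                      · exact le_refl _
                      · exact h1 l hl.1
                  simp only [hsw, hrem, Bool.false_eq_true, Bool.not_false, if_true,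
                    if_false, hmax, pvRem]

-- the combination pvStepN performs on the tracked maximum
def pvComb (a b : Option Nat) : Option Nat :=
  match a, b with
  | a, none => a
  | none, some b => some b
  | some a, some b => some (max a b)

-- B's step, reduced to the length component
def pvStepN (candidate : List Char) (acc : Option Nat) (raw : List Char) : Option Nat :=
  let l := PySem.Chars.strip raw
  if !l.isEmpty && pvValidB candidate l then
    match acc with
    | none => some l.length
    | some m => if l.length > m then some l.length else some m
  else acc

theorem pvComb_none (b : Option Nat) : pvComb none b = b := by
  cases b <;> rfl

theorem pvComb_assoc (a b c : Option Nat) : pvComb (pvComb a b) c = pvComb a (pvComb b c) := by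
  cases a <;> cases b <;> cases c <;> simp [pvComb, Nat.max_assoc]

-- B's step tracks exactly (length, remainder-at-that-length)
theorem pvStepB_map (candidate : List Char) (acc : Option Nat) (raw : List Char) :
    pvStepB candidate (PySem.Chars.lower candidate) (acc.map (fun n => (n, pvRem candidate n))) raw
      = (pvStepN candidate acc raw).map (fun n => (n, pvRem candidate n)) := by
  unfold pvStepB pvStepN
  cases h1 : (PySem.Chars.strip raw).isEmpty with
  | true => simp [h1]
  | false =>
      cases hsw : PySem.Chars.startswith (PySem.Chars.lower candidate)
          (PySem.Chars.lower (PySem.Chars.strip raw)) with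
      | false =>
          have hv : pvValidB candidate (PySem.Chars.strip raw) = false := by
            simp only [pvValidB, hsw, Bool.false_and]
          simp only [h1, hsw, hv, Bool.not_false, Bool.false_or, Bool.and_false,
            if_true, Bool.false_eq_true, if_false]
      | true =>
          cases hbd : (decide ((PySem.Chars.strip raw).length < candidate.length) &&
              !(pvSeps.contains (candidate.getD (PySem.Chars.strip raw).length ' '))) with
          | true =>
              have hv : pvValidB candidate (PySem.Chars.strip raw) = false := by
                simp only [pvValidB, hbd, Bool.not_true, Bool.and_false, Bool.false_and]
              simp only [h1, hsw, hbd, hv, Bool.not_true, Bool.not_false, Bool.false_or,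
                Bool.and_false, Bool.false_eq_true, if_false, if_true]
          | false =>
              cases hrem : ((candidate.drop (PySem.Chars.strip raw).length).dropWhile
                  (fun c => pvSeps.contains c)).isEmpty with
              | true =>
                  have hv : pvValidB candidate (PySem.Chars.strip raw) = false := by
                    simp only [pvValidB, pvRem, hrem, Bool.not_true, Bool.and_false]
                  simp only [h1, hsw, hbd, hrem, hv, Bool.not_true, Bool.not_false,
                    Bool.false_or, Bool.and_false, Bool.false_eq_true,
                    if_false, if_true]
              | false =>
                  have hv : pvValidB candidate (PySem.Chars.strip raw) = true := by
                    simp only [pvValidB, pvRem, hsw, hbd, hrem, Bool.not_false,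
                      Bool.and_true]
                  cases acc with
                  | none =>
                      simp only [h1, hsw, hbd, hrem, hv, Option.map_none, Option.map_some,
                        Bool.not_true, Bool.not_false, Bool.false_or,
                        Bool.and_true, Bool.false_eq_true, if_false, if_true, pvRem]
                  | some m =>
                      simp only [h1, hsw, hbd, hrem, hv, Option.map_some, Bool.not_true,
                        Bool.not_false, Bool.false_or, Bool.and_true,
                        Bool.false_eq_true, if_false, if_true, pvRem]
                      by_cases hgt : (PySem.Chars.strip raw).length > m
                      · simp [hgt]
                      · simp [hgt]

-- the fold of pvStepN computes the maximal valid length over the cleaned locations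
theorem pvFoldN_eq (candidate : List Char) (xs : List (List Char)) (acc : Option Nat) :
    xs.foldl (pvStepN candidate) acc =
      pvComb acc (pvVL candidate ((xs.map PySem.Chars.strip).filter (fun l => !l.isEmpty))) := by
  induction xs generalizing acc with
  | nil => cases acc <;> simp [pvVL, pvComb]
  | cons x xs ih =>
      rw [List.foldl_cons, ih]
      cases hne : (PySem.Chars.strip x).isEmpty with
      | true =>
          have hstep : pvStepN candidate acc x = acc := by
            simp [pvStepN, hne]
          rw [hstep]
          simp [hne]
      | false =>
          cases hv : pvValidB candidate (PySem.Chars.strip x) with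
          | true =>
              have hstep : pvStepN candidate acc x
                  = pvComb acc (some (PySem.Chars.strip x).length) := by
                cases acc with
                | none => simp [pvStepN, hne, hv, pvComb]
                | some m =>
                    by_cases hgt : (PySem.Chars.strip x).length > m
                    · simp [pvStepN, hne, hv, pvComb, hgt, Nat.max_eq_right (le_of_lt hgt)]
                    · simp [pvStepN, hne, hv, pvComb, hgt, Nat.max_eq_left (Nat.le_of_not_lt hgt)]
              rw [hstep, pvComb_assoc]
              congr 1
              have hhead : pvVL candidate (((x :: xs).map PySem.Chars.strip).filter (fun l => !l.isEmpty))
                  = (((PySem.Chars.strip x).length) ::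
                      ((((xs.map PySem.Chars.strip).filter (fun l => !l.isEmpty)).filter
                        (pvValidB candidate)).map List.length)).max? := by
                simp [pvVL, hne, hv]
              rw [hhead, List.max?_cons]
              unfold pvVL
              cases ((((xs.map PySem.Chars.strip).filter (fun l => !l.isEmpty)).filter
                  (pvValidB candidate)).map List.length).max? with
              | none => rfl
              | some b => rfl
          | false =>
              have hstep : pvStepN candidate acc x = acc := by
                simp [pvStepN, hv]
              rw [hstep]
              have hvl : pvVL candidate (((x :: xs).map PySem.Chars.strip).filter (fun l => !l.isEmpty))
                  = pvVL candidate ((xs.map PySem.Chars.strip).filter (fun l => !l.isEmpty)) := by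
                simp [pvVL, hne, hv]
              rw [hvl]

-- B's fold computes the maximal valid length, paired with its remainder
theorem pvFoldB_eq (candidate : List Char) (xs : List (List Char)) :
    xs.foldl (pvStepB candidate (PySem.Chars.lower candidate)) none =
      (pvVL candidate ((xs.map PySem.Chars.strip).filter (fun l => !l.isEmpty))).map
        (fun n => (n, pvRem candidate n)) := by
  have key : ∀ (ys : List (List Char)) (acc : Option Nat),
      ys.foldl (pvStepB candidate (PySem.Chars.lower candidate))
          (acc.map (fun n => (n, pvRem candidate n)))
        = (ys.foldl (pvStepN candidate) acc).map (fun n => (n, pvRem candidate n)) := by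
    intro ys
    induction ys with
    | nil => intro acc; rfl
    | cons y ys ih =>
        intro acc
        rw [List.foldl_cons, List.foldl_cons, pvStepB_map, ih]
  have h0 := key xs none
  simp only [Option.map_none] at h0
  rw [h0, pvFoldN_eq, pvComb_none]

-- sorting and deduplicating does not change the maximal valid length
theorem pvVL_sorted (candidate : List Char) (locs : List (List Char)) :
    pvVL candidate (PySem.List.sorted (PySem.Set.ofList locs) (fun l => l.length) true) =
      pvVL candidate locs := by
  unfold pvVL
  apply pvMax?_ext
  intro n
  simp only [List.mem_map, List.mem_filter, PySem.List.mem_sorted, PySem.Set.mem_ofList]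

-- ===== VERDICT (by name: the statement is the Claim_ definition above) =====
theorem strip_location_prefix_py_spec : Claim_equal_strip_location_prefix_py := by
  intro name locations _
  unfold Spec_strip_location_prefix_py strip_location_prefix_py strip_location_prefix_py_alt
  by_cases h0 : name.toList.isEmpty
  · simp [h0]
  · simp only [h0, Bool.false_eq_true, if_false]
    by_cases h1 : (PySem.Chars.strip name.toList).isEmpty
    · simp [h1]
    · simp only [h1, Bool.false_eq_true, if_false]
      rw [pvFoldB_eq, pvLoopA_eq _ _ (PySem.List.sorted_pairwise_rev _ _), pvVL_sorted]
      simp only [List.map_map, Function.comp_def]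
      cases pvVL (PySem.Chars.strip name.toList)
          ((locations.map (fun l => PySem.Chars.strip l.toList)).filter (fun l => !l.isEmpty)) <;>
        simp
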